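-- pv_equiv track=rewrite | github.com/shaurya30305/Wiring_aware_positioning | src.py | generate_simple_row_config
-- ===== SOURCE A (Python) =====
-- def generate_simple_row_config(gatecoordi):
--     config = []
--     current_x = 0
--
--     for gate in gatecoordi:
--         gate_width = gate[0][0]
--         config.append([current_x, 0])
--         current_x += gate_width + 1
--
--     return config
-- ===== SOURCE B (Python) =====
-- def generate_simple_row_config(gatecoordi):
--     # closed form: the x-offset of gate i is the total width (+1 spacing each)
--     # of all gates before it
--     return [[sum(h[0][0] + 1 for h in gatecoordi[:i]), 0]
--             for i in range(len(gatecoordi))]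
-- ===== Notes on version B (the rewrite author's own statement) =====
-- stated objective: alternative
-- what changed: Replaces the running-accumulator loop by a closed-form per-index expression: the x-offset of gate i is computed directly as the sum of widths(+1) of the prefix gatecoordi[:i].
import Mathlib
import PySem

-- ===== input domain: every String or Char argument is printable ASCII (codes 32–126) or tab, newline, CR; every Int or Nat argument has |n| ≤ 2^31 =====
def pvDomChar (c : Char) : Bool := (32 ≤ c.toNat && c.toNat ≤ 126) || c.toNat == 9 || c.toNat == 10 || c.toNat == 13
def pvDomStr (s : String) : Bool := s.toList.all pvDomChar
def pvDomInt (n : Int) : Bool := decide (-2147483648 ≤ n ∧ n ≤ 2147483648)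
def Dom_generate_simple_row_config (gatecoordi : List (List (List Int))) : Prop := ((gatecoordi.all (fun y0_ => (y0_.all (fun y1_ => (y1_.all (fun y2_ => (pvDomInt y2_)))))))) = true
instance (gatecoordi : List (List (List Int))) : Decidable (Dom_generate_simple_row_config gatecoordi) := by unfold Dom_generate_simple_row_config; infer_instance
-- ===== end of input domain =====

-- B computes each x-offset as a closed-form prefix sum of widths instead of A's running accumulator; same cost class is not claimed (B is quadratic).

-- ===== PORT A =====
-- gate[0][0]: inside Pre_ both indexings succeed, so the .getD defaults are never used
def pvWidthA (gate : List (List Int)) : Int :=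
  (PySem.List.pyGet? ((PySem.List.pyGet? gate 0).getD []) 0).getD 0

def generate_simple_row_config (gatecoordi : List (List (List Int))) : List (List Int) :=
  (gatecoordi.foldl
    (fun (st : List (List Int) × Int) gate =>
      let gate_width := pvWidthA gate
      (st.1 ++ [[st.2, 0]], st.2 + (gate_width + 1)))
    ([], 0)).1

-- ===== PORT B =====
def pvWidthB (h : List (List Int)) : Int :=
  (PySem.List.pyGet? ((PySem.List.pyGet? h 0).getD []) 0).getD 0

-- range(len(gatecoordi)) / gatecoordi[:i] with 0 ≤ i ≤ len ported as List.range / List.take — exact here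
def generate_simple_row_config_alt (gatecoordi : List (List (List Int))) : List (List Int) :=
  (List.range gatecoordi.length).map
    (fun i => [((gatecoordi.take i).map (fun h => pvWidthB h + 1)).sum, 0])

-- ===== PRECONDITION & SPEC =====
-- Pre_ excludes exactly the inputs on which A raises IndexError: a gate with no rows, or whose first row is empty
def Pre_generate_simple_row_config (gatecoordi : List (List (List Int))) : Prop :=
  ∀ gate ∈ gatecoordi, gate ≠ [] ∧ gate.headD [] ≠ []
instance (gatecoordi : List (List (List Int))) : Decidable (Pre_generate_simple_row_config gatecoordi) := by unfold Pre_generate_simple_row_config; infer_instance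

def pvWitness_generate_simple_row_config : List (List (List Int)) := [[[3, 2]], [[5]], [[0, 1]]]

def Spec_generate_simple_row_config (gatecoordi : List (List (List Int))) (out : List (List Int)) : Prop := out = generate_simple_row_config_alt gatecoordi
instance (gatecoordi : List (List (List Int))) (out : List (List Int)) : Decidable (Spec_generate_simple_row_config gatecoordi out) := by unfold Spec_generate_simple_row_config; infer_instance

-- ===== CLAIM (what is proved, stated in full; the proofs are below) =====
def Claim_equal_generate_simple_row_config : Prop := ∀ (gatecoordi : List (List (List Int))), Dom_generate_simple_row_config gatecoordi → Pre_generate_simple_row_config gatecoordi → Spec_generate_simple_row_config gatecoordi (generate_simple_row_config gatecoordi)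

-- ===== LEMMAS AND PROOFS =====
theorem pvWidth_eq (g : List (List Int)) : pvWidthA g = pvWidthB g := rfl

-- A's fold, started from accumulator acc and offset cx, appends exactly B's prefix-sum table shifted by cx
theorem pv_main (g : List (List (List Int))) (acc : List (List Int)) (cx : Int) :
    (g.foldl
      (fun (st : List (List Int) × Int) gate =>
        (st.1 ++ [[st.2, 0]], st.2 + (pvWidthA gate + 1)))
      (acc, cx)).1
    = acc ++ (List.range g.length).map
        (fun i => [cx + ((g.take i).map (fun h => pvWidthB h + 1)).sum, 0]) := by
  induction g generalizing acc cx with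
  | nil => simp
  | cons x t ih =>
      simp only [List.foldl_cons, List.length_cons, List.range_succ_eq_map,
        List.map_cons, List.map_map]
      rw [ih]
      simp [Function.comp, List.take_succ_cons, pvWidth_eq, add_assoc]

-- ===== VERDICT (by name: the statement is the Claim_ definition above) =====
theorem generate_simple_row_config_spec : Claim_equal_generate_simple_row_config := by
  intro g _ _
  unfold Spec_generate_simple_row_config generate_simple_row_config generate_simple_row_config_alt
  rw [pv_main]
  simp
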